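-- pv_equiv track=rewrite | github.com/akirbaes/Pixel-Font | red_font_visualizer.py | word_width
-- ===== SOURCE A (Python) =====
-- FONT_WIDTH = 2
--
-- spacesize = 1
--
-- font_hsep = 0
--
-- def word_width(word):
-- 	xlong = 0
-- 	for char in word:
-- 		if(char == " "):
-- 			xlong+=spacesize
-- 		else:
-- 			xlong+=FONT_WIDTH+font_hsep
-- 	xshort = xlong
-- 	for i in range(len(word)-1,-1,-1):
-- 		if(word[i]==" "):
-- 			xshort-=spacesize
-- 		else:
-- 			break
-- 	xshort-=font_hsep
-- 	return xlong, xshort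
-- ===== SOURCE B (Python) =====
-- FONT_WIDTH = 2
--
-- spacesize = 1
--
-- font_hsep = 0
--
-- def word_width(word):
--     # Single forward pass: track total width and the width as of the last
--     # non-space character seen; no second (reverse) scan over the word.
--     xlong = 0
--     xshort_end = 0
--     for char in word:
--         if char == " ":
--             xlong += spacesize
--         else:
--             xlong += FONT_WIDTH + font_hsep
--             xshort_end = xlong
--     return xlong, xshort_end - font_hsep
-- ===== Notes on version B (the rewrite author's own statement) =====
-- stated objective: alternative
-- what changed: A makes two passes (a forward width sum, then a reverse scan with break subtracting trailing spaces); B is one fused forward pass keeping a second accumulator that records the width at the last non-space character, so the reverse scan disappears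
import Mathlib
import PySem

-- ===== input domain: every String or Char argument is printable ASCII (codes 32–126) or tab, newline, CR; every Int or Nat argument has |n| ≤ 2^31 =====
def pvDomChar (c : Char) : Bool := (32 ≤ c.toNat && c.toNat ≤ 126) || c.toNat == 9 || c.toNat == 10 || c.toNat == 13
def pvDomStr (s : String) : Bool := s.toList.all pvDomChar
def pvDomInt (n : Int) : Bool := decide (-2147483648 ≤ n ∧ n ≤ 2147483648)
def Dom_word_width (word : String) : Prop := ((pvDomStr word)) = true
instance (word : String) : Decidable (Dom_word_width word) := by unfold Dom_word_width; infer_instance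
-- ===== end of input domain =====

-- B replaces A's two passes (forward sum, then reverse scan with break) by ONE forward pass
-- keeping a second accumulator = width at the last non-space character; objective: alternative.

-- ===== PORT A =====
-- forward loop accumulating xlong
def wwLong : List Char → Int → Int
  | [], x => x
  | c :: rest, x => wwLong rest (if c == ' ' then x + 1 else x + (2 + 0))

-- reverse index loop with break: scans the characters from the end, stops at first non-space
def wwShort : List Char → Int → Int
  | [], x => x
  | c :: rest, x => if c == ' ' then wwShort rest (x - 1) else x

def word_width (word : String) : Int × Int :=
  let xlong := wwLong word.toList 0
  (xlong, wwShort word.toList.reverse xlong - 0)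

-- ===== PORT B =====
-- single forward pass with two accumulators (total width, width at last non-space char)
def wwB : List Char → Int → Int → Int × Int
  | [], x, last => (x, last)
  | c :: rest, x, last =>
    if c == ' ' then wwB rest (x + 1) last
    else wwB rest (x + (2 + 0)) (x + (2 + 0))

def word_width_alt (word : String) : Int × Int :=
  let p := wwB word.toList 0 0
  (p.1, p.2 - 0)

-- ===== PRECONDITION & SPEC =====
def Spec_word_width (word : String) (out : Int × Int) : Prop := out = word_width_alt word
instance (word : String) (out : Int × Int) : Decidable (Spec_word_width word out) := by unfold Spec_word_width; infer_instance

-- ===== CLAIM (what is proved, stated in full; the proofs are below) =====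
def Claim_equal_word_width : Prop := ∀ (word : String), Dom_word_width word → Spec_word_width word (word_width word)

-- ===== LEMMAS AND PROOFS =====

-- total width of a list of characters
def sw (l : List Char) : Int := (l.map (fun c => if c == ' ' then (1 : Int) else 2 + 0)).sum

-- number of trailing spaces, by structural recursion from the left
def trail : List Char → Int
  | [] => 0
  | c :: rest => trail rest + (if c == ' ' ∧ rest.all (· == ' ') then 1 else 0)

theorem sw_cons (c : Char) (rest : List Char) :
    sw (c :: rest) = (if c == ' ' then (1 : Int) else 2 + 0) + sw rest := by
  simp [sw]

theorem wwLong_eq (l : List Char) (x : Int) : wwLong l x = x + sw l := by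
  induction l generalizing x with
  | nil => simp [wwLong, sw]
  | cons c rest ih =>
    rw [wwLong, ih, sw_cons]
    split <;> ring

theorem sw_all_space (l : List Char) (h : l.all (· == ' ') = true) :
    sw l = (l.length : Int) := by
  induction l with
  | nil => simp [sw]
  | cons c rest ih =>
    simp only [List.all_cons, Bool.and_eq_true, beq_iff_eq] at h
    rw [sw_cons, ih h.2, if_pos (by simp [h.1]), List.length_cons]
    push_cast; ring

theorem trail_all_space (l : List Char) (h : l.all (· == ' ') = true) :
    trail l = (l.length : Int) := by
  induction l with
  | nil => simp [trail]
  | cons c rest ih =>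
    simp only [List.all_cons, Bool.and_eq_true, beq_iff_eq] at h
    rw [trail, ih h.2, if_pos ⟨by simp [h.1], h.2⟩, List.length_cons]
    push_cast; ring

theorem takeWhile_reverse_eq_trail (l : List Char) :
    ((l.reverse.takeWhile (fun c => c == ' ')).length : Int) = trail l := by
  induction l with
  | nil => simp [trail]
  | cons c rest ih =>
    rw [List.reverse_cons, List.takeWhile_append]
    by_cases hall : rest.all (· == ' ') = true
    · have htw : rest.reverse.takeWhile (fun c => c == ' ') = rest.reverse := by
        apply List.takeWhile_eq_self_iff.mpr
        intro a ha
        have := List.all_eq_true.mp hall a (List.mem_reverse.mp ha)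
        simpa using this
      rw [htw, if_pos rfl]
      by_cases hc : c = ' '
      · rw [trail, if_pos ⟨by simp [hc], hall⟩, trail_all_space rest hall]
        simp [hc, List.takeWhile]
      · have hb : (c == ' ') = false := by simp [hc]
        rw [trail, if_neg (by simp [hc]), trail_all_space rest hall]
        simp [List.takeWhile, hb]
    · have hne : rest.reverse.takeWhile (fun c => c == ' ') ≠ rest.reverse := by
        intro h
        apply hall
        have := List.takeWhile_eq_self_iff.mp h
        apply List.all_eq_true.mpr
        intro a ha
        simpa using this a (List.mem_reverse.mpr ha)
      have hlt : (rest.reverse.takeWhile (fun c => c == ' ')).length ≠ rest.reverse.length := by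
        intro h
        exact hne ((List.takeWhile_sublist _).eq_of_length h)
      rw [if_neg (by simpa using hlt)]
      rw [trail, if_neg (by simp [hall]), add_zero]
      exact ih

theorem wwShort_eq (l : List Char) (x : Int) :
    wwShort l x = x - ((l.takeWhile (fun c => c == ' ')).length : Int) := by
  induction l generalizing x with
  | nil => simp [wwShort]
  | cons c rest ih =>
    by_cases h : c = ' '
    · simp [wwShort, h, ih, List.takeWhile]
      ring
    · have hb : (c == ' ') = false := by simp [h]
      simp [wwShort, List.takeWhile, hb]

theorem wwB_fst (l : List Char) (x last : Int) : (wwB l x last).1 = x + sw l := by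
  induction l generalizing x last with
  | nil => simp [wwB, sw]
  | cons c rest ih =>
    rw [wwB]
    split
    · rw [ih, sw_cons, if_pos (by assumption)]; ring
    · rw [ih, sw_cons, if_neg (by assumption)]; ring

theorem wwB_snd (l : List Char) (x last : Int) :
    (wwB l x last).2 =
      if l.all (· == ' ') = true then last else x + sw l - trail l := by
  induction l generalizing x last with
  | nil => simp [wwB]
  | cons c rest ih =>
    by_cases hc : (c == ' ') = true
    · rw [wwB, if_pos hc, ih]
      by_cases hall : rest.all (· == ' ') = true
      · rw [if_pos hall, if_pos (by simp [hc, hall])]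
      · rw [if_neg hall, if_neg (by simp [hall]), sw_cons, if_pos hc,
          trail, if_neg (by simp [hall])]
        ring
    · have hcons : ¬ ((c :: rest).all (· == ' ') = true) := by
        simp only [List.all_cons, Bool.and_eq_true]
        exact fun h => hc h.1
      have htrail : ¬ ((c == ' ') = true ∧ rest.all (· == ' ') = true) :=
        fun h => hc h.1
      rw [wwB, if_neg hc, ih, if_neg hcons, sw_cons, if_neg hc, trail, if_neg htrail, add_zero]
      by_cases hall : rest.all (· == ' ') = true
      · rw [if_pos hall, sw_all_space rest hall, trail_all_space rest hall]
        ring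
      · rw [if_neg hall]
        ring

theorem word_width_eq_alt (word : String) : word_width word = word_width_alt word := by
  simp only [word_width, word_width_alt]
  rw [wwLong_eq, wwShort_eq, takeWhile_reverse_eq_trail, wwB_fst, wwB_snd]
  by_cases hall : word.toList.all (· == ' ') = true
  · rw [if_pos hall, trail_all_space _ hall, sw_all_space _ hall]
    simp
  · rw [if_neg hall]

-- ===== VERDICT (by name: the statement is the Claim_ definition above) =====
theorem word_width_spec : Claim_equal_word_width := by
  intro word _
  exact word_width_eq_alt word
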